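-- pv_equiv track=rewrite | github.com/onjurefree/alx-higher_level_programming | 0x07-python-test_driven_development/2-matrix_divided.py | matrix_len
-- ===== SOURCE A (Python) =====
-- def matrix_len(matrix):
--     if len(matrix) == 0:
--         return False
--
--     row_size = len(matrix[0])
--     for row in matrix[1:]:
--         if len(row) != row_size:
--             return False
--     return True
-- ===== SOURCE B (Python) =====
-- def matrix_len(matrix):
--     if len(matrix) == 0:
--         return False
--     lengths = [len(row) for row in matrix]
--     return min(lengths) == max(lengths)
-- ===== Notes on version B (the rewrite author's own statement) =====
-- stated objective: alternative
-- what changed: Instead of comparing each row's length to the first row's with early exit, B builds the list of row lengths and checks that its minimum equals its maximum (all equal iff min = max).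
import Mathlib
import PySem

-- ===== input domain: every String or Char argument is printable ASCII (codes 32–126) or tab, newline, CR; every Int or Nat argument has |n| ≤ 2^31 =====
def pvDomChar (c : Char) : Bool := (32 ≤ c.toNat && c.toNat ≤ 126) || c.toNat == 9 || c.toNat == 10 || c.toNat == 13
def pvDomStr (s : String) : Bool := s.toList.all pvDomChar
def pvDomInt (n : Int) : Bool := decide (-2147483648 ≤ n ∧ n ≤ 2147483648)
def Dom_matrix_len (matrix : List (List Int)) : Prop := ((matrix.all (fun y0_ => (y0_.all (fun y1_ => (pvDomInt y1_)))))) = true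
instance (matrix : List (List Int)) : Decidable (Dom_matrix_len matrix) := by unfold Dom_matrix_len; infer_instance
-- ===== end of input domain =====

-- B checks min(row lengths) == max(row lengths) instead of A's compare-each-row-to-the-first loop with early exit.

-- ===== PORT A =====
-- the 'for row in matrix[1:]' loop with early return
def matrixLenLoopA (row_size : Int) : List (List Int) → Bool
  | [] => true
  | r :: rs => if (r.length : Int) ≠ row_size then false else matrixLenLoopA row_size rs

def matrix_len (matrix : List (List Int)) : Bool :=
  if matrix.length = 0 then false
  else matrixLenLoopA ((matrix.headD []).length : Int) matrix.tail

-- ===== PORT B =====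
def matrix_len_alt (matrix : List (List Int)) : Bool :=
  if matrix.length = 0 then false
  else
    let lengths := matrix.map (fun row => (row.length : Int))
    PySem.List.min? lengths (fun x => x) == PySem.List.max? lengths (fun x => x)

-- ===== PRECONDITION & SPEC =====
def Spec_matrix_len (matrix : List (List Int)) (out : Bool) : Prop := out = matrix_len_alt matrix
instance (matrix : List (List Int)) (out : Bool) : Decidable (Spec_matrix_len matrix out) := by unfold Spec_matrix_len; infer_instance

-- ===== CLAIM =====
def Claim_equal_matrix_len : Prop := ∀ (matrix : List (List Int)), Dom_matrix_len matrix → Spec_matrix_len matrix (matrix_len matrix)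

-- ===== LEMMAS AND PROOFS =====

lemma loopA_eq_true_iff (x : Int) (rs : List (List Int)) :
    matrixLenLoopA x rs = true ↔ ∀ r ∈ rs, (r.length : Int) = x := by
  induction rs with
  | nil => simp [matrixLenLoopA]
  | cons r rs ih =>
    by_cases h : (r.length : Int) = x
    · simp [matrixLenLoopA, h, ih]
    · simp [matrixLenLoopA, h]

lemma foldl_min_le_init (a : Int) (l : List Int) : l.foldl min a ≤ a := by
  induction l generalizing a with
  | nil => simp
  | cons b t ih => exact le_trans (ih (min a b)) (min_le_left a b)

lemma foldl_min_le_mem {x : Int} {l : List Int} (hx : x ∈ l) (a : Int) :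
    l.foldl min a ≤ x := by
  induction l generalizing a with
  | nil => cases hx
  | cons b t ih =>
    rcases List.mem_cons.mp hx with rfl | hxt
    · exact le_trans (foldl_min_le_init (min a x) t) (min_le_right a x)
    · exact ih hxt (min a b)

lemma init_le_foldl_max (a : Int) (l : List Int) : a ≤ l.foldl max a := by
  induction l generalizing a with
  | nil => simp
  | cons b t ih => exact le_trans (le_max_left a b) (ih (max a b))

lemma mem_le_foldl_max {x : Int} {l : List Int} (hx : x ∈ l) (a : Int) :
    x ≤ l.foldl max a := by
  induction l generalizing a with
  | nil => cases hx
  | cons b t ih =>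
    rcases List.mem_cons.mp hx with rfl | hxt
    · exact le_trans (le_max_right a x) (init_le_foldl_max (max a x) t)
    · exact ih hxt (max a b)

lemma foldl_min_of_all {a : Int} {l : List Int} (h : ∀ x ∈ l, x = a) :
    l.foldl min a = a := by
  induction l with
  | nil => rfl
  | cons b t ih =>
    have hb : b = a := h b (by simp)
    simp only [List.foldl_cons, hb, min_self]
    exact ih (fun x hx => h x (by simp [hx]))

lemma foldl_max_of_all {a : Int} {l : List Int} (h : ∀ x ∈ l, x = a) :
    l.foldl max a = a := by
  induction l with
  | nil => rfl
  | cons b t ih =>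
    have hb : b = a := h b (by simp)
    simp only [List.foldl_cons, hb, max_self]
    exact ih (fun x hx => h x (by simp [hx]))

-- ===== VERDICT =====
theorem matrix_len_spec : Claim_equal_matrix_len := by
  intro matrix _
  unfold Spec_matrix_len
  cases matrix with
  | nil => rfl
  | cons r0 rs =>
    simp only [matrix_len, matrix_len_alt, List.length_cons, List.headD_cons, List.tail_cons,
      List.map_cons, if_neg (by omega : ¬ (rs.length + 1 = 0)),
      PySem.List.min?_id_cons, PySem.List.max?_id_cons]
    set ls := rs.map (fun row => (row.length : Int)) with hls
    by_cases h : ∀ r ∈ rs, (r.length : Int) = (r0.length : Int)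
    · have hall : ∀ x ∈ ls, x = (r0.length : Int) := by
        intro x hx
        rcases List.mem_map.mp hx with ⟨r, hr, rfl⟩
        exact h r hr
      rw [(loopA_eq_true_iff _ _).mpr h, foldl_min_of_all hall, foldl_max_of_all hall]
      simp
    · rw [not_forall] at h
      simp only [not_forall, exists_prop] at h
      rcases h with ⟨r, hr, hne⟩
      have h1 : matrixLenLoopA ((r0.length : Int)) rs = false := by
        cases hb : matrixLenLoopA ((r0.length : Int)) rs with
        | true => exact absurd ((loopA_eq_true_iff _ _).mp hb r hr) hne
        | false => rfl
      have hx : (r.length : Int) ∈ ls := List.mem_map.mpr ⟨r, hr, rfl⟩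
      have hmin1 : ls.foldl min (r0.length : Int) ≤ (r.length : Int) := foldl_min_le_mem hx _
      have hmin2 : ls.foldl min (r0.length : Int) ≤ (r0.length : Int) := foldl_min_le_init _ _
      have hmax1 : (r.length : Int) ≤ ls.foldl max (r0.length : Int) := mem_le_foldl_max hx _
      have hmax2 : (r0.length : Int) ≤ ls.foldl max (r0.length : Int) := init_le_foldl_max _ _
      have : ls.foldl min (r0.length : Int) ≠ ls.foldl max (r0.length : Int) := by omega
      simp [h1, this]
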